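-- pv_equiv track=rewrite | github.com/oat9002/SentimentalPrediction | model.py | divided_thread_len_end
-- ===== SOURCE A (Python) =====
-- def divided_thread_len_end(size, total_thread):
--     thread_len_end = []
--     temp = 0
--     t_size = size
--     if size >= total_thread:
--         for idx in range(0, total_thread):
--             divide = int(size / total_thread)
--             if idx != total_thread - 1:
--                 thread_len_end.append(divide + temp)
--                 t_size -= divide
--             else:
--                 thread_len_end.append(t_size + temp)
--             temp += divide
--     else:
--         thread_len_end.append(size)
--     return thread_len_end
-- ===== SOURCE B (Python) =====
-- def divided_thread_len_end(size, total_thread):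
--     if size < total_thread:
--         return [size]
--     if total_thread <= 0:
--         return []
--     divide = size // total_thread
--     return [divide * (i + 1) for i in range(total_thread - 1)] + [size]
-- ===== Notes on version B (the rewrite author's own statement) =====
-- stated objective: simpler
-- what changed: Replaces the running-sum loop with temp/t_size accumulators (and a division recomputed every iteration) by a direct closed-form comprehension [divide*(i+1) for i in range(total_thread-1)] + [size], with the degenerate cases (size<total_thread, total_thread<=0) handled up front without division.
import Mathlib
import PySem

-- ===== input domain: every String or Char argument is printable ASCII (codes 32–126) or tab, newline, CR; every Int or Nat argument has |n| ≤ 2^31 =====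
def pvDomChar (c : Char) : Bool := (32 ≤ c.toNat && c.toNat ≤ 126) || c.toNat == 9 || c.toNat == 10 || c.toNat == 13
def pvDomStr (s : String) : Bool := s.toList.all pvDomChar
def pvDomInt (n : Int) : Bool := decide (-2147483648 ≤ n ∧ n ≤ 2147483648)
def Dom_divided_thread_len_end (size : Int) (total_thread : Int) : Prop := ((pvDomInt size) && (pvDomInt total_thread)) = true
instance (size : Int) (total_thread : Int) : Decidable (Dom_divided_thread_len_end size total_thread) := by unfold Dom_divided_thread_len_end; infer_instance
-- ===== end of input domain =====

-- ===== PORT A =====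
-- int(size/total_thread) is ported as floor division: the loop body only runs when
-- 0 < total_thread ≤ size ≤ 2^31, where Python's float division truncates exactly to the floor.
def divided_thread_len_end (size : Int) (total_thread : Int) : List Int :=
  if size ≥ total_thread then
    ((PySem.List.pyRange 0 total_thread 1).foldl
      (fun (s : List Int × Int × Int) idx =>
        let divide := PySem.Int.floordiv size total_thread
        if idx ≠ total_thread - 1 then
          (s.1 ++ [divide + s.2.1], s.2.1 + divide, s.2.2 - divide)
        else
          (s.1 ++ [s.2.2 + s.2.1], s.2.1 + divide, s.2.2))
      ([], 0, size)).1
  else [size]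

-- ===== PORT B =====
def divided_thread_len_end_alt (size : Int) (total_thread : Int) : List Int :=
  if size < total_thread then [size]
  else if total_thread ≤ 0 then []
  else
    let divide := PySem.Int.floordiv size total_thread
    ((List.range (total_thread - 1).toNat).map (fun i => divide * ((i : Int) + 1))) ++ [size]

-- ===== PRECONDITION & SPEC =====
def Spec_divided_thread_len_end (size : Int) (total_thread : Int) (out : List Int) : Prop := out = divided_thread_len_end_alt size total_thread
instance (size : Int) (total_thread : Int) (out : List Int) : Decidable (Spec_divided_thread_len_end size total_thread out) := by unfold Spec_divided_thread_len_end; infer_instance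

-- ===== CLAIM (what is proved, stated in full; the proofs are below) =====
def Claim_equal_divided_thread_len_end : Prop := ∀ (size : Int) (total_thread : Int), Dom_divided_thread_len_end size total_thread → Spec_divided_thread_len_end size total_thread (divided_thread_len_end size total_thread)

-- ===== LEMMAS AND PROOFS =====

-- ===== VERDICT (by name: the statement is the Claim_ definition above) =====
-- loop invariant: the fold over the first m indices (all ≠ total_thread-1) builds the
-- closed-form prefix and the accumulators temp = d*m, t_size = size - d*m
theorem loopA_inv (size n d : Int) (m : Nat) (hm : (m : Int) ≤ n - 1) :
    (PySem.List.pyRange 0 (m : Int) 1).foldl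
      (fun (s : List Int × Int × Int) idx =>
        if idx ≠ n - 1 then
          (s.1 ++ [d + s.2.1], s.2.1 + d, s.2.2 - d)
        else
          (s.1 ++ [s.2.2 + s.2.1], s.2.1 + d, s.2.2))
      ([], 0, size)
    = ((List.range m).map (fun i => d * ((i : Int) + 1)), d * m, size - d * m) := by
  induction m with
  | zero => simp [PySem.List.pyRange_one_eq_nil]
  | succ k ih =>
    have h1 : ((k + 1 : Nat) : Int) = (k : Int) + 1 := by push_cast; ring
    have h2 : PySem.List.pyRange 0 ((k : Int) + 1) 1
        = PySem.List.pyRange 0 (k : Int) 1 ++ [(k : Int)] := by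
      simpa using PySem.List.pyRange_one_succ_right (a := 0) (b := (k : Int)) (by positivity)
    have hk : ((k : Int)) ≤ n - 1 := by
      have := hm; push_cast at this; omega
    have hne : (k : Int) ≠ n - 1 := by
      have := hm; push_cast at this; omega
    rw [h1, h2, List.foldl_append, ih hk]
    simp only [List.foldl_cons, List.foldl_nil, if_pos hne]
    refine Prod.ext ?_ (Prod.ext ?_ ?_)
    · simp [List.range_succ]; ring
    · simp; ring
    · simp; ring

theorem divided_thread_len_end_spec : Claim_equal_divided_thread_len_end := by
  intro size n _hd
  unfold Spec_divided_thread_len_end divided_thread_len_end divided_thread_len_end_alt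
  by_cases hlt : size < n
  · rw [if_neg (by omega), if_pos hlt]
  · rw [if_pos (by omega), if_neg hlt]
    by_cases hn : n ≤ 0
    · rw [if_pos hn, PySem.List.pyRange_one_eq_nil hn]
      simp
    · rw [if_neg hn]
      set d := PySem.Int.floordiv size n with hd
      have hm : ((n - 1).toNat : Int) = n - 1 := by omega
      have hsplit : PySem.List.pyRange 0 n 1
          = PySem.List.pyRange 0 (n - 1) 1 ++ [n - 1] := by
        have := PySem.List.pyRange_one_succ_right (a := 0) (b := n - 1) (by omega)
        simpa [show n - 1 + 1 = n by ring] using this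
      rw [hsplit, List.foldl_append]
      rw [show PySem.List.pyRange 0 (n-1) 1 = PySem.List.pyRange 0 ((n-1).toNat : Int) 1 by rw [hm]]
      rw [loopA_inv size n d (n-1).toNat (by omega)]
      simp only [List.foldl_cons, List.foldl_nil, if_neg (by simp : ¬ (n - 1 ≠ n - 1))]
      simp [hm]
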